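-- pv_equiv track=rewrite | github.com/magnusdv/filtus | filtus/FiltusUtils.py | chromInt
-- ===== SOURCE A (Python) =====
-- def chromInt(s):
--     try:
--         return int(s)
--     except ValueError:
--         if s == 'X': return 23
--         if s == 'Y': return 24
--         if s.startswith('chr'): return chromInt(s[3:])
--         else: return 25
-- ===== SOURCE B (Python) =====
-- def chromInt(s):
--     # Strip every leading 'chr' repetition first, then classify once.
--     # Correct because an int-parsable string, 'X' and 'Y' never start with 'chr',
--     # so A's per-level int/X/Y tests can only succeed after all 'chr' prefixes are gone.
--     t = s
--     while t.startswith('chr'):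
--         t = t[3:]
--     try:
--         return int(t)
--     except ValueError:
--         return 23 if t == 'X' else 24 if t == 'Y' else 25
-- ===== Notes on version B (the rewrite author's own statement) =====
-- stated objective: alternative
-- what changed: B separates the work into two stages: first strip all leading 'chr' repetitions in a loop, then classify the remainder once (int / X / Y / 25), instead of A's tail recursion that re-tests int and X/Y at every level; correct because no int-parsable string and neither 'X' nor 'Y' starts with 'chr'.
import Mathlib
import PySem

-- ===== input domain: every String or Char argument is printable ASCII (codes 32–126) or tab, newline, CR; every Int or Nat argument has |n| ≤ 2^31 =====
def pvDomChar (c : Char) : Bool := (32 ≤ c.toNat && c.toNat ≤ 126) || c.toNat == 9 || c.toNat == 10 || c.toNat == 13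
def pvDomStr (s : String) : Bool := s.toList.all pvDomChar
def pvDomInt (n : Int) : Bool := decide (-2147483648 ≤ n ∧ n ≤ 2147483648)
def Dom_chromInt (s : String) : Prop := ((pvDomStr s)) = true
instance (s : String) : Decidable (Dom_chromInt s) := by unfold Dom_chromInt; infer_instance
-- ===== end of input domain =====

-- B decomposes the job into two stages — strip every leading 'chr' repetition, then classify the
-- remainder once (int / X / Y / 25) — instead of A's tail recursion re-testing int and X/Y per level.

-- ===== PORT A =====
-- termination helper: a string starting with "chr" loses length when sliced from 3
theorem pvDropChr_lt (s : String) (h : PySem.Str.startswith s "chr" = true) :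
    (PySem.Str.slice s (some 3) none).toList.length < s.toList.length := by
  have hpre : ("chr".toList) <+: s.toList := by
    simpa using (PySem.Chars.startswith_iff (s := s.toList) (p := "chr".toList)).1 (by simpa using h)
  have hlen : 3 ≤ s.toList.length := by simpa using hpre.length_le
  have hd : (PySem.Str.slice s (some 3) none).toList = s.toList.drop 3 := by
    simp [pysem]
  rw [hd, List.length_drop]
  omega

def chromInt (s : String) : Int :=
  match PySem.Int.ofStr? s with
  | some n => n
  | none =>
    if s = "X" then 23
    else if s = "Y" then 24
    else if h : PySem.Str.startswith s "chr" = true then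
      chromInt (PySem.Str.slice s (some 3) none)
    else 25
termination_by s.toList.length
decreasing_by exact pvDropChr_lt s h

-- ===== PORT B =====
-- the while-loop of Source B: strip one leading 'chr' per iteration until none is left
def pvStripChr (s : String) : String :=
  if h : PySem.Str.startswith s "chr" = true then
    pvStripChr (PySem.Str.slice s (some 3) none)
  else s
termination_by s.toList.length
decreasing_by exact pvDropChr_lt s h

-- the single classification of Source B, applied to the fully stripped string
def chromInt_alt (s : String) : Int :=
  let t := pvStripChr s
  match PySem.Int.ofStr? t with
  | some n => n
  | none => if t = "X" then 23 else if t = "Y" then 24 else 25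

-- ===== PRECONDITION & SPEC =====
def Spec_chromInt (s : String) (out : Int) : Prop := out = chromInt_alt s
instance (s : String) (out : Int) : Decidable (Spec_chromInt s out) := by unfold Spec_chromInt; infer_instance

-- ===== CLAIM (what is proved, stated in full; the proofs are below) =====
def Claim_equal_chromInt : Prop := ∀ (s : String), Dom_chromInt s → Spec_chromInt s (chromInt s)

-- ===== LEMMAS AND PROOFS =====
-- no int-parsable string starts with 'c' (int() admits only whitespace, sign, digits, '_')
theorem pvStep1 (rest : List Char) :
    List.dropWhile PySem.Int.isIntSpace ('c'::rest) = 'c'::rest := by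
  simp [PySem.Int.isIntSpace]

theorem pvStep2 (l : List Char) :
    List.dropWhile PySem.Int.isIntSpace (l ++ ['c']) =
      List.dropWhile PySem.Int.isIntSpace l ++ ['c'] := by
  rw [List.dropWhile_append]
  split
  next h => rw [List.isEmpty_iff.mp h]; simp [PySem.Int.isIntSpace]
  next => rfl

theorem pvScrut (w : List Char) :
    (List.dropWhile PySem.Int.isIntSpace
      (List.dropWhile PySem.Int.isIntSpace ('c'::w)).reverse).reverse =
    'c' :: (List.dropWhile PySem.Int.isIntSpace w.reverse).reverse := by
  rw [pvStep1, show ('c'::w).reverse = w.reverse ++ ['c'] from by simp, pvStep2,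
     List.reverse_append]
  simp

theorem pvOfChars_c_none (w : List Char) : PySem.Int.ofChars? ('c' :: w) = none := by
  simp only [PySem.Int.ofChars?]
  rw [pvScrut]
  generalize (List.dropWhile PySem.Int.isIntSpace w.reverse).reverse = r
  split
  next h => simp at h
  next h => simp at h
  next => rfl

theorem pvOfStr_chr_none (s : String) (h : PySem.Str.startswith s "chr" = true) :
    PySem.Int.ofStr? s = none := by
  have hpre : ("chr".toList) <+: s.toList := by
    simpa using (PySem.Chars.startswith_iff (s := s.toList) (p := "chr".toList)).1 (by simpa using h)
  obtain ⟨t, ht⟩ := hpre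
  have hlist : s.toList = 'c' :: ('h' :: 'r' :: t) := by simpa using ht.symm
  simp only [PySem.Int.ofStr?, hlist]
  exact pvOfChars_c_none _

theorem pvChr_ne_X (s : String) (h : PySem.Str.startswith s "chr" = true) : ¬ s = "X" := by
  rintro rfl; exact absurd h (by decide)

theorem pvChr_ne_Y (s : String) (h : PySem.Str.startswith s "chr" = true) : ¬ s = "Y" := by
  rintro rfl; exact absurd h (by decide)

theorem chromInt_eq_alt (s : String) : chromInt s = chromInt_alt s := by
  rw [chromInt]
  by_cases hc : PySem.Str.startswith s "chr" = true
  · have hstrip : pvStripChr s = pvStripChr (PySem.Str.slice s (some 3) none) := by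
      rw [pvStripChr, dif_pos hc]
    simp only [pvOfStr_chr_none s hc, if_neg (pvChr_ne_X s hc), if_neg (pvChr_ne_Y s hc),
      dif_pos hc]
    rw [chromInt_eq_alt (PySem.Str.slice s (some 3) none)]
    unfold chromInt_alt
    rw [← hstrip]
  · have hstrip : pvStripChr s = s := by rw [pvStripChr, dif_neg hc]
    unfold chromInt_alt
    rw [hstrip]
    have hc2 : PySem.Chars.startswith s.toList ['c', 'h', 'r'] ≠ true := by
      simpa [PySem.Str.startswith_eq] using hc
    cases h : PySem.Int.ofStr? s with
    | some n => simp only [h]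
    | none => simp [h, hc2]
termination_by s.toList.length
decreasing_by exact pvDropChr_lt s hc

-- ===== VERDICT (by name: the statement is the Claim_ definition above) =====
theorem chromInt_spec : Claim_equal_chromInt := by
  intro s _
  unfold Spec_chromInt
  exact chromInt_eq_alt s
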